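-- pv_equiv track=rewrite | github.com/urovas/aiX-platform | workspace/AutoExam/src/autoexam/analyzers/failure_cluster_analyzer.py | _parse_param_key
-- ===== SOURCE A (Python) =====
-- from typing import Dict, List
--
-- def _parse_param_key(key: str) -> Dict:
--     """解析参数键"""
--     params = {}
--     parts = key.split('_')
--
--     i = 0
--     while i < len(parts):
--         if i + 1 < len(parts):
--             param_name = parts[i]
--             param_value = parts[i + 1]
--             params[param_name] = param_value
--             i += 2
--         else:
--             i += 1
--
--     return params
-- ===== SOURCE B (Python) =====
-- from typing import Dict
--
-- def _parse_param_key(key: str) -> Dict: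
--     """解析参数键"""
--     parts = key.split('_')
--     return dict(zip(parts[::2], parts[1::2]))
-- ===== Notes on version B (the rewrite author's own statement) =====
-- stated objective: idiomatic
-- what changed: Replaces the index-stepping while-loop with two strided slices zipped into a dict; zip's truncation replaces the i+1<len guard.
import Mathlib
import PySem

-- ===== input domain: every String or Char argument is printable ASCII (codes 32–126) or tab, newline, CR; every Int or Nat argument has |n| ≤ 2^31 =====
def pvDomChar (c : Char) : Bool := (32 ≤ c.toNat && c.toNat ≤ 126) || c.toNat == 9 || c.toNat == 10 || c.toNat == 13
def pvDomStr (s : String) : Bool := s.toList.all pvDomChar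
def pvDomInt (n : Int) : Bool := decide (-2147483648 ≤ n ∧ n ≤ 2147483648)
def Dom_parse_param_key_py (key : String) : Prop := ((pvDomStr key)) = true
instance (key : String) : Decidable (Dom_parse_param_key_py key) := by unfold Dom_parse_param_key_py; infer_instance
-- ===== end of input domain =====

-- B replaces A's index-stepping while-loop by zipping the two strided slices parts[::2] and parts[1::2] into a dict (idiomatic; same cost).


-- ===== PORT A =====
-- the while loop: i stepping by 2 (or by 1 past an unpaired tail), inserting parts[i] ↦ parts[i+1]
def pqWhileA (parts : List String) (i : Nat) (params : PySem.Dict String String) :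
    PySem.Dict String String :=
  if i < parts.length then
    if i + 1 < parts.length then
      pqWhileA parts (i + 2) (params.insert (parts.getD i "") (parts.getD (i + 1) ""))
    else
      pqWhileA parts (i + 1) params
  else params
termination_by parts.length - i

def parse_param_key_py (key : String) : List (String × String) :=
  (pqWhileA ((PySem.Str.split? key "_").getD []) 0 PySem.Dict.empty).items

-- ===== PORT B =====
def parse_param_key_py_alt (key : String) : List (String × String) :=
  let parts := (PySem.Str.split? key "_").getD []
  let names := (PySem.List.slice? parts none none 2).getD []      -- parts[::2]
  let values := (PySem.List.slice? parts (some 1) none 2).getD [] -- parts[1::2]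
  ((names.zip values).foldl (fun d p => d.insert p.1 p.2) PySem.Dict.empty).items

-- ===== PRECONDITION & SPEC =====
def Spec_parse_param_key_py (key : String) (out : List (String × String)) : Prop := out = parse_param_key_py_alt key
instance (key : String) (out : List (String × String)) : Decidable (Spec_parse_param_key_py key out) := by unfold Spec_parse_param_key_py; infer_instance

-- ===== CLAIM (what is proved, stated in full; the proofs are below) =====
def Claim_equal_parse_param_key_py : Prop := ∀ (key : String), Dom_parse_param_key_py key → Spec_parse_param_key_py key (parse_param_key_py key)

-- ===== LEMMAS AND PROOFS =====

-- every second element starting at the head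
def pvEv2 {α : Type} : List α → List α
  | [] => []
  | [a] => [a]
  | a :: _ :: r => a :: pvEv2 r

-- consecutive (name, value) pairs, dropping an unpaired tail
def pvPairs {α : Type} : List α → List (α × α)
  | a :: b :: r => (a, b) :: pvPairs r
  | _ => []

theorem pvEv2_cons_tail {α : Type} (b : α) (r : List α) :
    pvEv2 (b :: r) = b :: pvEv2 r.tail := by
  cases r <;> simp [pvEv2]

theorem pvZip_ev2 {α : Type} (xs : List α) :
    (pvEv2 xs).zip (pvEv2 xs.tail) = pvPairs xs := by
  induction xs using pvEv2.induct with
  | case1 => rfl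
  | case2 a => rfl
  | case3 a b r ih =>
      rw [pvPairs]
      have h1 : pvEv2 (a :: b :: r) = a :: pvEv2 r := rfl
      rw [h1, List.tail_cons, pvEv2_cons_tail, List.zip_cons_cons, ih]

-- closed form of the strided-slice filterMap: it is pvEv2
theorem pvFilterMap_ev2 {α : Type} (xs : List α) :
    (List.range ((xs.length + 1) / 2)).filterMap (fun k => xs[2 * k]?) = pvEv2 xs := by
  induction xs using pvEv2.induct with
  | case1 => simp [pvEv2]
  | case2 a => simp [pvEv2, List.range_succ]
  | case3 a b r ih =>
      have hlen : ((a :: b :: r).length + 1) / 2 = ((r.length + 1) / 2) + 1 := by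
        simp [List.length_cons]; omega
      rw [hlen, List.range_succ_eq_map, List.filterMap_cons, List.filterMap_map]
      simp only [mul_zero, List.getElem?_cons_zero]
      have : ∀ k, (a :: b :: r)[2 * (k + 1)]? = r[2 * k]? := by
        intro k
        have h2 : 2 * (k + 1) = (2 * k) + 1 + 1 := by omega
        rw [h2]; simp
      simp only [Function.comp_def, this]
      rw [ih]; rfl

theorem pvSlice2_zero {α : Type} (xs : List α) :
    (PySem.List.slice? xs none none 2).getD [] = pvEv2 xs := by
  rw [← pvFilterMap_ev2]
  simp only [PySem.List.slice?, PySem.List.sliceIndices]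
  norm_num
  have hcnt : (if 0 < xs.length then (((xs.length : Int) + 2 - 1) / 2).toNat else 0)
      = (xs.length + 1) / 2 := by
    split_ifs with h <;> omega
  rw [hcnt]
  apply List.filterMap_congr
  intro k _
  congr 1

theorem pvSlice2_one {α : Type} (xs : List α) :
    (PySem.List.slice? xs (some 1) none 2).getD [] = pvEv2 xs.tail := by
  cases xs with
  | nil => rfl
  | cons a t =>
      rw [List.tail_cons, ← pvFilterMap_ev2]
      simp only [PySem.List.slice?, PySem.List.sliceIndices]
      norm_num
      have hcnt : (if 0 < t.length then (((t.length : Int) + 2 - 1) / 2).toNat else 0)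
          = (t.length + 1) / 2 := by
        split_ifs with h <;> omega
      rw [hcnt]
      apply List.filterMap_congr
      intro k _
      have hidx : ((1 : Int) + 2 * (k : Int)).toNat = 2 * k + 1 := by omega
      rw [hidx, List.getElem?_cons_succ]

-- the while loop folds exactly the consecutive pairs of the unprocessed suffix
theorem pqWhileA_eq_fold (parts : List String) :
    ∀ i (d : PySem.Dict String String),
      pqWhileA parts i d =
        (pvPairs (parts.drop i)).foldl (fun d p => d.insert p.1 p.2) d := by
  suffices H : ∀ n i (d : PySem.Dict String String), parts.length - i ≤ n →
      pqWhileA parts i d =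
        (pvPairs (parts.drop i)).foldl (fun d p => d.insert p.1 p.2) d by
    intro i d
    exact H (parts.length - i) i d le_rfl
  intro n
  induction n with
  | zero =>
      intro i d h
      have hge : parts.length ≤ i := by omega
      rw [pqWhileA, if_neg (by omega), List.drop_eq_nil_of_le hge]
      rfl
  | succ n ih =>
      intro i d h
      rw [pqWhileA]
      split_ifs with h1 h2
      · have hd : parts.drop i = parts[i] :: parts[i + 1] :: parts.drop (i + 2) := by
          rw [List.drop_eq_getElem_cons h1, List.drop_eq_getElem_cons h2]
        rw [hd, pvPairs, List.foldl_cons, ih (i + 2) _ (by omega),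
          List.getD_eq_getElem _ _ h1, List.getD_eq_getElem _ _ h2]
      · have hd : parts.drop i = [parts[i]] := by
          rw [List.drop_eq_getElem_cons h1, List.drop_eq_nil_of_le (by omega)]
        have hd' : parts.drop (i + 1) = [] := List.drop_eq_nil_of_le (by omega)
        rw [ih (i + 1) d (by omega), hd, hd']
        rfl
      · rw [List.drop_eq_nil_of_le (by omega)]
        rfl

-- ===== VERDICT (by name: the statement is the Claim_ definition above) =====
theorem parse_param_key_py_spec : Claim_equal_parse_param_key_py := by
  intro key _
  unfold Spec_parse_param_key_py parse_param_key_py parse_param_key_py_alt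
  dsimp only
  rw [pvSlice2_zero, pvSlice2_one, pvZip_ev2,
    pqWhileA_eq_fold _ 0, List.drop_zero]
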